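-- pv_equiv track=rewrite | github.com/euricoteles/python | ismai_exercises/ficha_5/exercicio14.py | verficArray
-- ===== SOURCE A (Python) =====
-- def verficArray(arrayOfNumbersFirst, arrayOfNumbersSecond):
--     flag = False;
--
--     for i in range(0, len(arrayOfNumbersFirst)):
--         for j in range(0, len(arrayOfNumbersSecond)):
--             if arrayOfNumbersFirst[i] == arrayOfNumbersSecond[j]:
--                 flag = True;
--                 if i <= len(arrayOfNumbersFirst):
--                    break;
--             else:
--                 flag = False;
--
--     return flag;
-- ===== SOURCE B (Python) =====
-- def verficArray(arrayOfNumbersFirst, arrayOfNumbersSecond):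
--     return bool(arrayOfNumbersFirst) and (arrayOfNumbersFirst[-1] in arrayOfNumbersSecond)
-- ===== Notes on version B (the rewrite author's own statement) =====
-- stated objective: simpler
-- what changed: Replaces the nested loops (whose flag is overwritten on every outer pass, so only the last element's membership survives) by a single membership test of the last element of the first list in the second list.
import Mathlib
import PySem

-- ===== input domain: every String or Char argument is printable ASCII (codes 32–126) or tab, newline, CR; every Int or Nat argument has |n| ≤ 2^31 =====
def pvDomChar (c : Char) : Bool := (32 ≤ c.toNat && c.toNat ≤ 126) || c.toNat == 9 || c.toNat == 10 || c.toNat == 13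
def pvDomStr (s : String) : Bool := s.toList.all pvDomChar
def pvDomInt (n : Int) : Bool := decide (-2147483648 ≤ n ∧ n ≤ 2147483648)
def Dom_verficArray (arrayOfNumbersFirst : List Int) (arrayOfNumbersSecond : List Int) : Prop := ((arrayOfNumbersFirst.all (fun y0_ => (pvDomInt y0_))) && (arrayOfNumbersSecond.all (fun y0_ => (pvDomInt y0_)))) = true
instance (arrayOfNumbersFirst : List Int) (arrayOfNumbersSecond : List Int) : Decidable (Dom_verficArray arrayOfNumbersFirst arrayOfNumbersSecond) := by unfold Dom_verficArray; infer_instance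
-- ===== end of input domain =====

-- B drops A's nested flag-overwriting loops and returns a single membership test of
-- the first list's last element in the second list (objective: simpler).

-- ===== PORT A =====
-- inner 'for j in range(0, len(second))' loop with its break; flag is the loop-carried state
def verficInner (first second : List Int) (i x : Int) : List Int → Bool → Bool
  | [], flag => flag
  | j :: js, _flag =>
      if x == PySem.List.pyGetD second j 0 then
        -- flag = True; if i <= len(first): break
        (if i ≤ PySem.List.len first then true
         else verficInner first second i x js true)
      else verficInner first second i x js false

-- outer 'for i in range(0, len(first))' loop
def verficOuter (first second : List Int) : List Int → Bool → Bool
  | [], flag => flag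
  | i :: is, flag =>
      verficOuter first second is
        (verficInner first second i (PySem.List.pyGetD first i 0)
          (PySem.List.pyRange 0 (PySem.List.len second) 1) flag)

def verficArray (arrayOfNumbersFirst : List Int) (arrayOfNumbersSecond : List Int) : Bool :=
  verficOuter arrayOfNumbersFirst arrayOfNumbersSecond
    (PySem.List.pyRange 0 (PySem.List.len arrayOfNumbersFirst) 1) false

-- ===== PORT B =====
-- bool(first) and (first[-1] in second)
def verficArray_alt (arrayOfNumbersFirst : List Int) (arrayOfNumbersSecond : List Int) : Bool :=
  !arrayOfNumbersFirst.isEmpty &&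
    (match PySem.List.pyGet? arrayOfNumbersFirst (-1) with
     | some x => arrayOfNumbersSecond.contains x
     | none => false)

-- ===== PRECONDITION & SPEC =====
def Spec_verficArray (arrayOfNumbersFirst : List Int) (arrayOfNumbersSecond : List Int) (out : Bool) : Prop := out = verficArray_alt arrayOfNumbersFirst arrayOfNumbersSecond
instance (arrayOfNumbersFirst : List Int) (arrayOfNumbersSecond : List Int) (out : Bool) : Decidable (Spec_verficArray arrayOfNumbersFirst arrayOfNumbersSecond out) := by unfold Spec_verficArray; infer_instance

-- ===== CLAIM (what is proved, stated in full; the proofs are below) =====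
def Claim_equal_verficArray : Prop := ∀ (arrayOfNumbersFirst : List Int) (arrayOfNumbersSecond : List Int), Dom_verficArray arrayOfNumbersFirst arrayOfNumbersSecond → Spec_verficArray arrayOfNumbersFirst arrayOfNumbersSecond (verficArray arrayOfNumbersFirst arrayOfNumbersSecond)

-- ===== LEMMAS AND PROOFS =====

-- The inner loop over indices pre.length, …, (pre++suf).length-1 of 'second = pre ++ suf'
-- scans suf: it returns true at the first match, false if suf is nonempty without a match,
-- and leaves flag untouched when suf is empty.
theorem verficInner_spec (first : List Int) (i x : Int) (hi : i ≤ PySem.List.len first)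
    (pre suf : List Int) (flag : Bool) :
    verficInner first (pre ++ suf) i x
      (PySem.List.pyRange (pre.length : Int) ((pre ++ suf).length : Int) 1) flag
    = if suf.contains x then true else if suf.isEmpty then flag else false := by
  induction suf generalizing pre flag with
  | nil =>
      rw [PySem.List.pyRange_one_eq_nil (by simp)]
      simp [verficInner]
  | cons s rest ih =>
      rw [PySem.List.pyRange_one_cons (by simp)]
      have hget : PySem.List.pyGetD (pre ++ s :: rest) (pre.length : Int) 0 = s := by
        rw [PySem.List.pyGetD_natCast]
        simp [List.getD_eq_getElem?_getD]
      have hi' : i ≤ (first.length : Int) := by simpa [PySem.List.len_eq] using hi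
      simp only [verficInner, hget]
      by_cases hx : x = s
      · simp [hx, PySem.List.len_eq, hi']
      · have hx' : (x == s) = false := by simp [hx]
        have hl : pre ++ s :: rest = (pre ++ [s]) ++ rest := by simp
        rw [hx']
        simp only [Bool.false_eq_true, if_false]
        rw [hl, show ((pre.length : Int) + 1) = (((pre ++ [s]).length : Nat) : Int) from by simp,
          ih (pre ++ [s])]
        simp [hx]

-- When second is empty the inner loop body never runs, so the outer loop returns flag.
theorem verficOuter_nil (first : List Int) (is : List Int) (flag : Bool) :
    verficOuter first [] is flag = flag := by
  induction is generalizing flag with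
  | nil => rfl
  | cons i is ih =>
      simp only [verficOuter]
      rw [show PySem.List.pyRange 0 (PySem.List.len ([] : List Int)) 1 = [] from by
        simp [PySem.List.len_eq]]
      simp only [verficInner]
      exact ih flag

-- With second nonempty, the outer loop over indices pre.length, …, (pre++suf).length-1
-- leaves flag only when suf is empty, and otherwise ends with the membership test of
-- the LAST element of suf (each pass overwrites flag completely).
theorem verficOuter_spec (second : List Int) (hs : second ≠ []) (pre suf : List Int)
    (flag : Bool) :
    verficOuter (pre ++ suf) second
      (PySem.List.pyRange (pre.length : Int) ((pre ++ suf).length : Int) 1) flag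
    = match suf.getLast? with
      | none => flag
      | some l => second.contains l := by
  induction suf generalizing pre flag with
  | nil =>
      rw [PySem.List.pyRange_one_eq_nil (by simp)]
      simp [verficOuter]
  | cons s rest ih =>
      rw [PySem.List.pyRange_one_cons (by simp)]
      simp only [verficOuter]
      have hget : PySem.List.pyGetD (pre ++ s :: rest) (pre.length : Int) 0 = s := by
        rw [PySem.List.pyGetD_natCast]
        simp [List.getD_eq_getElem?_getD]
      have hinner : ∀ f : Bool,
          verficInner (pre ++ s :: rest) second (pre.length : Int)
            (PySem.List.pyGetD (pre ++ s :: rest) (pre.length : Int) 0)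
            (PySem.List.pyRange 0 (PySem.List.len second) 1) f
          = second.contains s := by
        intro f
        rw [hget]
        have := verficInner_spec (pre ++ s :: rest) (pre.length : Int) s
          (by simp only [PySem.List.len_eq, List.length_append, List.length_cons]; push_cast; omega)
          [] second f
        simp only [List.nil_append, List.length_nil, Int.natCast_zero] at this
        rw [show PySem.List.len second = ((second.length : Nat) : Int) from
          PySem.List.len_eq second, this]
        cases h : second.contains s <;> simp [hs]
      rw [hinner]
      have hl : pre ++ s :: rest = (pre ++ [s]) ++ rest := by simp
      rw [hl, show ((pre.length : Int) + 1) = (((pre ++ [s]).length : Nat) : Int) from by simp,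
        ih (pre ++ [s])]
      cases rest with
      | nil => simp
      | cons r rs =>
          cases h : (r :: rs).getLast? with
          | none => simp at h
          | some l => simp [h]

-- ===== VERDICT (by name: the statement is the Claim_ definition above) =====
theorem verficArray_spec : Claim_equal_verficArray := by
  intro f s _
  show verficArray f s = verficArray_alt f s
  unfold verficArray verficArray_alt
  cases hs : s with
  | nil =>
      rw [verficOuter_nil]
      cases f with
      | nil => simp
      | cons a as =>
          rw [PySem.List.pyGet?_neg_one]
          cases h : (a :: as).getLast? <;> simp
  | cons b bs =>
      rw [PySem.List.len_eq,
        show (0 : Int) = ((([] : List Int)).length : Int) from by simp,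
        show f = [] ++ f from by simp,
        verficOuter_spec (b :: bs) (by simp) [] f]
      cases hf : f with
      | nil => simp
      | cons a as =>
          rw [PySem.List.pyGet?_neg_one]
          cases h : (a :: as).getLast? with
          | none => simp at h
          | some l => simp [h]
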